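-- pv_equiv track=rewrite | github.com/masassy38062/python_100knocks | 004_word2dict.py | word2dict
-- ===== SOURCE A (Python) =====
-- def word2dict(msg):
--     temp = ''
--     temp_msg = ''
--     temp_list=[]
--     i = 1
--
--     for temp in msg:
--         if(temp==' ' or temp=='. '):
--             temp_list.append((i, temp_msg))
--             temp_msg = ''
--             i = i + 1
--         else:
--             temp_msg+=temp
--     temp_list.append((i,temp_msg))
--     return  temp_list
-- ===== SOURCE B (Python) =====
-- def word2dict(msg):
--     # split once on the single-space delimiter (keeps empty tokens), then index the words
--     return [(i, w) for i, w in enumerate(msg.split(' '), 1)]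
-- ===== Notes on version B (the rewrite author's own statement) =====
-- stated objective: idiomatic
-- what changed: Replaces the character-by-character accumulate-and-emit loop (whose char-vs-two-char-string comparison branch is always false) with a single space-delimited str.split followed by enumerate starting at 1.
import Mathlib
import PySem

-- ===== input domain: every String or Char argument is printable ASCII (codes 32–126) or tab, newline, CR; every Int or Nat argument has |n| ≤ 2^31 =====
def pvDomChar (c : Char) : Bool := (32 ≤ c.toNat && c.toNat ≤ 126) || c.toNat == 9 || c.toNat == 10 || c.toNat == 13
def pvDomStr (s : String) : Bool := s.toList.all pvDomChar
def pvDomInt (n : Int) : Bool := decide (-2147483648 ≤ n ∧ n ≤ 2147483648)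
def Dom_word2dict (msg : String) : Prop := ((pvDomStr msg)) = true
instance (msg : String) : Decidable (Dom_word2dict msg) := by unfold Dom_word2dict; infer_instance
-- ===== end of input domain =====

-- B replaces A's character-by-character accumulate-and-emit loop with split(' ') + enumerate (more idiomatic, same cost).


-- ===== PORT A =====
-- Python's temp_msg string is carried as List Char; the comparison temp == '. '
-- (a single char vs a two-char string) is always False in Python and is omitted.
def word2dict (msg : String) : List (Int × String) :=
  let st := msg.toList.foldl
    (fun (st : List Char × List (Int × String) × Int) temp =>
      if temp = ' ' then
        (([] : List Char), st.2.1 ++ [(st.2.2, String.ofList st.1)], st.2.2 + 1)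
      else
        (st.1 ++ [temp], st.2.1, st.2.2))
    ([], [], 1)
  st.2.1 ++ [(st.2.2, String.ofList st.1)]

-- ===== PORT B =====
def word2dict_alt (msg : String) : List (Int × String) :=
  match PySem.Str.split? msg " " with
  | some parts => PySem.List.enumerate parts 1
  | none => []   -- unreachable: the separator " " is non-empty

-- ===== PRECONDITION & SPEC =====
def Spec_word2dict (msg : String) (out : List (Int × String)) : Prop := out = word2dict_alt msg
instance (msg : String) (out : List (Int × String)) : Decidable (Spec_word2dict msg out) := by unfold Spec_word2dict; infer_instance

-- ===== CLAIM (what is proved, stated in full; the proofs are below) =====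
def Claim_equal_word2dict : Prop := ∀ (msg : String), Dom_word2dict msg → Spec_word2dict msg (word2dict msg)

-- ===== LEMMAS AND PROOFS =====

-- Specification function for splitting on a single space, threading the current word.
def splitSp (cur : List Char) : List Char → List (List Char)
  | [] => [cur]
  | c :: rest => if c = ' ' then cur :: splitSp [] rest else splitSp (cur ++ [c]) rest

lemma go_eq_splitSp (fuel : Nat) (l cur : List Char) (acc : List (List Char))
    (h : l.length ≤ fuel) :
    PySem.Chars.splitOn.go [' '] fuel l cur acc = acc.reverse ++ splitSp cur.reverse l := by
  induction fuel generalizing l cur acc with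
  | zero =>
    have hl : l = [] := List.eq_nil_of_length_eq_zero (Nat.le_zero.mp h)
    subst hl
    simp [PySem.Chars.splitOn.go, splitSp]
  | succ fuel ih =>
    cases l with
    | nil => simp [PySem.Chars.splitOn.go, splitSp]
    | cons c rest =>
      by_cases hc : c = ' '
      · subst hc
        have hp : List.isPrefixOf [' '] (' ' :: rest) = true := by
          simp [List.isPrefixOf]
        simp only [PySem.Chars.splitOn.go, hp, if_true, List.length_singleton,
          List.drop_succ_cons, List.drop_zero]
        rw [ih rest [] (cur.reverse :: acc) (by simpa using Nat.le_of_succ_le_succ h)]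
        simp [splitSp]
      · have hp : List.isPrefixOf [' '] (c :: rest) = false := by
          simp [List.isPrefixOf]
          intro h'; exact absurd h'.symm hc
        simp only [PySem.Chars.splitOn.go, hp]
        rw [ih rest (c :: cur) acc (by simpa using Nat.le_of_succ_le_succ h)]
        simp [splitSp, hc]

lemma splitOn_eq_splitSp (l : List Char) :
    PySem.Chars.splitOn l [' '] = splitSp [] l := by
  have := go_eq_splitSp (l.length + 1) l [] [] (Nat.le_succ _)
  simpa [PySem.Chars.splitOn] using this

lemma foldA_eq (l : List Char) (cur : List Char) (acc : List (Int × String)) (i : Int) :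
    (let st := l.foldl
        (fun (st : List Char × List (Int × String) × Int) temp =>
          if temp = ' ' then
            (([] : List Char), st.2.1 ++ [(st.2.2, String.ofList st.1)], st.2.2 + 1)
          else
            (st.1 ++ [temp], st.2.1, st.2.2))
        (cur, acc, i)
     st.2.1 ++ [(st.2.2, String.ofList st.1)])
      = acc ++ PySem.List.enumerate ((splitSp cur l).map String.ofList) i := by
  induction l generalizing cur acc i with
  | nil => simp [splitSp]
  | cons c rest ih =>
    by_cases hc : c = ' '
    · subst hc
      simp only [List.foldl_cons, if_true]
      rw [ih]
      simp [splitSp]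
    · simp only [List.foldl_cons, if_neg hc]
      rw [ih]
      simp [splitSp, hc]

-- ===== VERDICT (by name: the statement is the Claim_ definition above) =====
theorem word2dict_spec : Claim_equal_word2dict := by
  intro msg _
  unfold Spec_word2dict word2dict word2dict_alt
  have hsplit : PySem.Str.split? msg " " =
      some ((PySem.Chars.splitOn msg.toList [' ']).map String.ofList) := by
    simp [PySem.Str.split?, PySem.Chars.split?]
  rw [hsplit]
  simpa [splitOn_eq_splitSp] using foldA_eq msg.toList [] [] 1
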